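-- pv_equiv track=rewrite | github.com/cassanof/CodeRM | codeprm/dataset/clean_reasoning_steps.py | get_reasoning_steps
-- ===== SOURCE A (Python) =====
-- from typing import List
--
-- def get_reasoning_steps(code: str) -> List[str]:
--     lines = code.split('\n')
--     comments = []
--     current_comment = []
--
--     for line in lines:
--         stripped_line = line.lstrip()
--         if stripped_line.startswith('#'):
--             comment_content = stripped_line[1:].strip()
--             current_comment.append(comment_content)
--         else:
--             if current_comment:
--                 comments.append(' '.join(current_comment))
--                 current_comment = []
--
--     if current_comment:
--         comments.append(' '.join(current_comment))
--
--     return comments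
-- ===== SOURCE B (Python) =====
-- def get_reasoning_steps(code):
--     lines = code.split('\n')
--     flags = [l.lstrip().startswith('#') for l in lines]
--     cleaned = [l.lstrip()[1:].strip() for l in lines]
--     starts = [i for i, (p, f) in enumerate(zip([False] + flags, flags)) if f and not p]
--     ends = [i for i, (f, nx) in enumerate(zip(flags, flags[1:] + [False])) if f and not nx]
--     return [' '.join(cleaned[s:e + 1]) for s, e in zip(starts, ends)]
-- ===== Notes on version B (the rewrite author's own statement) =====
-- stated objective: alternative
-- what changed: Replaces A's streaming accumulator (buffer of current comment lines, flushed on each non-comment line and once after the loop) by a staged boundary-detection algorithm: compute a flag per line, find run starts/ends by comparing each flag with its neighbour, and slice-and-join the cleaned lines for each (start, end) pair.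
import Mathlib
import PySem

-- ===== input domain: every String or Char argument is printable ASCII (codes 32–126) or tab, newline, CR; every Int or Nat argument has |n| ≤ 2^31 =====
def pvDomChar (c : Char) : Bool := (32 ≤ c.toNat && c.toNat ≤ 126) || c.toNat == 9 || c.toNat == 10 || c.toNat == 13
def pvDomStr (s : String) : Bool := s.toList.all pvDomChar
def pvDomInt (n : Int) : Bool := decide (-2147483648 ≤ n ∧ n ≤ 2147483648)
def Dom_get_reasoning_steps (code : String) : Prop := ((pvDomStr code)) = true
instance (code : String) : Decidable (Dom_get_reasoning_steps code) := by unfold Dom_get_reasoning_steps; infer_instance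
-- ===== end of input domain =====

-- B replaces A's streaming accumulator with a staged boundary-detection algorithm:
-- flag every line, find run starts/ends by comparing adjacent flags, then slice (alternative; same O(n) cost).

-- ===== PORT A =====
-- literal transliteration: fold over lines with state (comments, current_comment), final flush.
-- split? is none only for an empty separator; "\n" ≠ "", so getD never fires.
def get_reasoning_steps (code : String) : List String :=
  let lines := (PySem.Str.split? code "\n").getD []
  let st := lines.foldl (fun (st : List String × List String) line =>
    let stripped := PySem.Str.lstrip line
    if PySem.Str.startswith stripped "#" then
      (st.1, st.2 ++ [PySem.Str.strip (PySem.Str.slice stripped (some 1) none)])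
    else
      if st.2 ≠ [] then (st.1 ++ [PySem.Str.join " " st.2], []) else st) ([], [])
  if st.2 ≠ [] then st.1 ++ [PySem.Str.join " " st.2] else st.1

-- ===== PORT B =====
-- staged passes: flags, cleaned, run starts (flag true, previous false), run ends (flag true,
-- next false), then one slice+join per (start, end) pair.  Comprehension with a filter is
-- ported as filter-then-map; enumerate(zip(...)) as PySem.List.enumerate of List.zip.
def get_reasoning_steps_alt (code : String) : List String :=
  let lines := (PySem.Str.split? code "\n").getD []
  let flags := lines.map (fun l => PySem.Str.startswith (PySem.Str.lstrip l) "#")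
  let cleaned := lines.map (fun l =>
    PySem.Str.strip (PySem.Str.slice (PySem.Str.lstrip l) (some 1) none))
  let starts := ((PySem.List.enumerate (([false] ++ flags).zip flags) 0).filter
    (fun x => x.2.2 && !x.2.1)).map (·.1)
  let ends := ((PySem.List.enumerate (flags.zip ((PySem.List.slice flags (some 1) none) ++ [false])) 0).filter
    (fun x => x.2.1 && !x.2.2)).map (·.1)
  (starts.zip ends).map (fun se =>
    PySem.Str.join " " (PySem.List.slice cleaned (some se.1) (some (se.2 + 1))))

-- ===== PRECONDITION & SPEC =====
def Spec_get_reasoning_steps (code : String) (out : List String) : Prop := out = get_reasoning_steps_alt code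
instance (code : String) (out : List String) : Decidable (Spec_get_reasoning_steps code out) := by unfold Spec_get_reasoning_steps; infer_instance

-- ===== CLAIM (what is proved, stated in full; the proofs are below) =====
def Claim_equal_get_reasoning_steps : Prop := ∀ (code : String), Dom_get_reasoning_steps code → Spec_get_reasoning_steps code (get_reasoning_steps code)

-- ===== LEMMAS AND PROOFS =====

-- key l = l.lstrip().startswith('#');  clean l = l.lstrip()[1:].strip()
def pvKey (l : String) : Bool := PySem.Str.startswith (PySem.Str.lstrip l) "#"
def pvClean (l : String) : String :=
  PySem.Str.strip (PySem.Str.slice (PySem.Str.lstrip l) (some 1) none)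

-- maximal runs of lines with equal key, in order
def pvGroupRuns : List String → List (Bool × List String)
  | [] => []
  | l :: ls =>
      (pvKey l, l :: ls.takeWhile (fun x => pvKey x == pvKey l)) ::
        pvGroupRuns (ls.dropWhile (fun x => pvKey x == pvKey l))
termination_by ls => ls.length
decreasing_by
  simpa using Nat.lt_succ_of_le (List.length_dropWhile_le _ _)

-- common characterization both proofs target: one joined string per comment run
def runJoin (lines : List String) : List String :=
  (pvGroupRuns lines).filterMap
    (fun g => if g.1 then some (PySem.Str.join " " (g.2.map pvClean)) else none)

-- ---------- A-side ----------

-- A's loop body, named for the proofs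
def aStep (st : List String × List String) (line : String) : List String × List String :=
  let stripped := PySem.Str.lstrip line
  if PySem.Str.startswith stripped "#" then
    (st.1, st.2 ++ [PySem.Str.strip (PySem.Str.slice stripped (some 1) none)])
  else
    if st.2 ≠ [] then (st.1 ++ [PySem.Str.join " " st.2], []) else st

-- A's whole computation from an arbitrary loop state
def aFull (lines : List String) (acc cur : List String) : List String :=
  let st := lines.foldl aStep (acc, cur)
  if st.2 ≠ [] then st.1 ++ [PySem.Str.join " " st.2] else st.1

theorem aStep_true {l : String} (h : pvKey l = true) (st : List String × List String) :
    aStep st l = (st.1, st.2 ++ [pvClean l]) := by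
  simp [aStep, pvKey, pvClean] at h ⊢; simp [h]

theorem aStep_false {l : String} (h : pvKey l = false) (st : List String × List String) :
    aStep st l = (if st.2 ≠ [] then (st.1 ++ [PySem.Str.join " " st.2], []) else st) := by
  simp [aStep, pvKey] at h ⊢; simp [h]

-- a run of comment lines just extends the current comment
theorem foldl_true_run (run : List String) (acc cur : List String)
    (h : ∀ x ∈ run, pvKey x = true) :
    run.foldl aStep (acc, cur) = (acc, cur ++ run.map pvClean) := by
  induction run generalizing cur with
  | nil => simp
  | cons r rs ih =>
      have hr : pvKey r = true := h r (by simp)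
      rw [List.foldl_cons, aStep_true hr]
      rw [ih (cur ++ [pvClean r]) (by intro x hx; exact h x (by simp [hx]))]
      simp

-- a run of non-comment lines with empty current comment is a no-op
theorem foldl_false_run (run : List String) (acc : List String)
    (h : ∀ x ∈ run, pvKey x = false) :
    run.foldl aStep (acc, []) = (acc, ([] : List String)) := by
  induction run with
  | nil => rfl
  | cons r rs ih =>
      have hr : pvKey r = false := h r (by simp)
      rw [List.foldl_cons, aStep_false hr, if_neg (by simp)]
      exact ih (by intro x hx; exact h x (by simp [hx]))

-- the head of dropWhile fails the predicate
theorem head_dropWhile_false {α : Type} (p : α → Bool) (ls : List α) {r : α} {rs : List α}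
    (h : ls.dropWhile p = r :: rs) : p r = false := by
  induction ls with
  | nil => simp at h
  | cons x xs ih =>
      by_cases hx : p x = true
      · rw [List.dropWhile_cons_of_pos hx] at h; exact ih h
      · rw [List.dropWhile_cons_of_neg hx] at h
        cases h; simpa using hx

-- flushing a nonempty current comment before a non-comment head equals having flushed already
theorem aFull_flush {r : String} (rs : List String) (hr : pvKey r = false)
    (acc cs : List String) (hcs : cs ≠ []) :
    aFull (r :: rs) acc cs = aFull (r :: rs) (acc ++ [PySem.Str.join " " cs]) [] := by
  unfold aFull
  rw [List.foldl_cons, List.foldl_cons, aStep_false hr, aStep_false hr]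
  simp [hcs]

-- main A invariant: A from a flushed state appends runJoin of the remaining lines
theorem aMain (n : Nat) : ∀ lines : List String, lines.length ≤ n → ∀ acc : List String,
    aFull lines acc [] = acc ++ runJoin lines := by
  induction n with
  | zero =>
      intro lines hlen acc
      have : lines = [] := List.eq_nil_of_length_eq_zero (Nat.le_zero.mp hlen)
      subst this; simp [aFull, runJoin, pvGroupRuns]
  | succ n ih =>
      intro lines hlen acc
      match lines with
      | [] => simp [aFull, runJoin, pvGroupRuns]
      | l :: ls =>
        have hls : ls = ls.takeWhile (fun x => pvKey x == pvKey l)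
            ++ ls.dropWhile (fun x => pvKey x == pvKey l) :=
          (List.takeWhile_append_dropWhile).symm
        have hrestlen : (ls.dropWhile (fun x => pvKey x == pvKey l)).length ≤ n := by
          have h1 := List.length_dropWhile_le (fun x => pvKey x == pvKey l) ls
          simp at hlen; omega
        have hrunkey : ∀ x ∈ ls.takeWhile (fun x => pvKey x == pvKey l), pvKey x = pvKey l := by
          intro x hx
          simpa using List.mem_takeWhile_imp hx
        have hgr : runJoin (l :: ls) =
            (if pvKey l then
              [PySem.Str.join " " ((l :: ls.takeWhile (fun x => pvKey x == pvKey l)).map pvClean)]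
             else []) ++ runJoin (ls.dropWhile (fun x => pvKey x == pvKey l)) := by
          rw [runJoin, pvGroupRuns, List.filterMap_cons, runJoin]
          by_cases hk : pvKey l = true <;> simp [hk]
        by_cases hk : pvKey l = true
        · -- comment run
          have hfold : (l :: ls.takeWhile (fun x => pvKey x == pvKey l)).foldl aStep (acc, []) =
              (acc, (l :: ls.takeWhile (fun x => pvKey x == pvKey l)).map pvClean) := by
            have := foldl_true_run (l :: ls.takeWhile (fun x => pvKey x == pvKey l)) acc []
              (by intro x hx; rcases List.mem_cons.mp hx with h | h
                  · subst h; exact hk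
                  · rw [hrunkey x h]; exact hk)
            simpa using this
          have hstep1 : aFull (l :: ls) acc [] =
              aFull (ls.dropWhile (fun x => pvKey x == pvKey l)) acc
                ((l :: ls.takeWhile (fun x => pvKey x == pvKey l)).map pvClean) := by
            unfold aFull
            conv_lhs => rw [hls]
            rw [show l :: (ls.takeWhile (fun x => pvKey x == pvKey l)
                  ++ ls.dropWhile (fun x => pvKey x == pvKey l)) =
                (l :: ls.takeWhile (fun x => pvKey x == pvKey l))
                  ++ ls.dropWhile (fun x => pvKey x == pvKey l) by simp,
              List.foldl_append, hfold]
          rw [hstep1, hgr, if_pos hk]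
          cases hdw : ls.dropWhile (fun x => pvKey x == pvKey l) with
          | nil =>
              simp [aFull, runJoin, pvGroupRuns]
          | cons r rs =>
              have hrk : pvKey r = false := by
                have := head_dropWhile_false (fun x => pvKey x == pvKey l) ls hdw
                simp [hk] at this; exact this
              rw [aFull_flush rs hrk acc _ (by simp)]
              rw [ih (r :: rs) (hdw ▸ hrestlen) _]
              simp
        · -- non-comment run
          have hkf : pvKey l = false := by simpa using hk
          have hfold : (l :: ls.takeWhile (fun x => pvKey x == pvKey l)).foldl aStep (acc, []) =
              (acc, ([] : List String)) := by
            exact foldl_false_run (l :: ls.takeWhile (fun x => pvKey x == pvKey l)) acc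
              (by intro x hx; rcases List.mem_cons.mp hx with h | h
                  · subst h; exact hkf
                  · rw [hrunkey x h]; exact hkf)
          have hstep1 : aFull (l :: ls) acc [] =
              aFull (ls.dropWhile (fun x => pvKey x == pvKey l)) acc [] := by
            unfold aFull
            conv_lhs => rw [hls]
            rw [show l :: (ls.takeWhile (fun x => pvKey x == pvKey l)
                  ++ ls.dropWhile (fun x => pvKey x == pvKey l)) =
                (l :: ls.takeWhile (fun x => pvKey x == pvKey l))
                  ++ ls.dropWhile (fun x => pvKey x == pvKey l) by simp,
              List.foldl_append, hfold]
          rw [hstep1, hgr, if_neg hk]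
          exact ih _ hrestlen acc

-- ---------- B-side ----------

-- recursive characterization of B's start indices (prev = previous line's flag)
def sIdx (prev : Bool) (s : Int) : List Bool → List Int
  | [] => []
  | f :: fs => if f && !prev then s :: sIdx f (s + 1) fs else sIdx f (s + 1) fs

-- recursive characterization of B's end indices (one-element lookahead)
def eIdx (s : Int) : List Bool → List Int
  | [] => []
  | [f] => if f then [s] else []
  | f :: f' :: fs => if f && !f' then s :: eIdx (s + 1) (f' :: fs) else eIdx (s + 1) (f' :: fs)

-- B's starts comprehension computes sIdx
theorem starts_eq (flags : List Bool) : ∀ (prev : Bool) (s : Int),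
    (((PySem.List.enumerate ((prev :: flags).zip flags) s).filter
      (fun x => x.2.2 && !x.2.1)).map (·.1)) = sIdx prev s flags := by
  induction flags with
  | nil => intro prev s; simp [sIdx, PySem.List.enumerate_nil]
  | cons f fs ih =>
      intro prev s
      rw [List.zip_cons_cons, PySem.List.enumerate_cons, sIdx]
      by_cases h : (f && !prev) = true <;>
        simp [h, ih f (s + 1)]

-- B's ends comprehension computes eIdx
theorem ends_eq (flags : List Bool) : ∀ (s : Int),
    (((PySem.List.enumerate (flags.zip ((flags.drop 1) ++ [false])) s).filter
      (fun x => x.2.1 && !x.2.2)).map (·.1)) = eIdx s flags := by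
  induction flags with
  | nil => intro s; simp [eIdx, PySem.List.enumerate_nil]
  | cons f fs ih =>
      intro s
      cases fs with
      | nil =>
          simp [eIdx, PySem.List.enumerate_cons, PySem.List.enumerate_nil, List.filter_cons]
          by_cases h : f = true <;> simp [h]
      | cons f' fs' =>
          rw [show ((f :: f' :: fs').drop 1 ++ [false]) = f' :: (fs' ++ [false]) by simp,
            List.zip_cons_cons, PySem.List.enumerate_cons, eIdx]
          have ih' := ih (s + 1)
          rw [show ((f' :: fs').drop 1 ++ [false]) = fs' ++ [false] by simp] at ih'
          by_cases h : (f && !f') = true <;> simp [h, ih']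

-- a false flag at the head is skipped by both index scans
theorem sIdx_false_cons (prev : Bool) (s : Int) (l : List Bool) :
    sIdx prev s (false :: l) = sIdx false (s + 1) l := by
  simp [sIdx]

theorem eIdx_false_cons (s : Int) (l : List Bool) :
    eIdx s (false :: l) = eIdx (s + 1) l := by
  cases l <;> simp [eIdx]

-- an all-false run is skipped entirely
theorem sIdx_all_false (fl : List Bool) : ∀ (prev : Bool) (s : Int) (fl' : List Bool),
    (∀ x ∈ fl, x = false) → fl ≠ [] →
    sIdx prev s (fl ++ fl') = sIdx false (s + fl.length) fl' := by
  induction fl with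
  | nil => intro _ _ _ _ hne; exact absurd rfl hne
  | cons f fs ih =>
      intro prev s fl' h _
      have hf : f = false := h f (by simp)
      subst hf
      rw [List.cons_append, sIdx_false_cons]
      cases hfs : fs with
      | nil => simp
      | cons g gs =>
          rw [← hfs, ih false (s + 1) fl'
            (by intro x hx; exact h x (by simp [hx])) (by simp [hfs])]
          congr 1
          simp only [List.length_cons]; push_cast; ring

theorem eIdx_all_false (fl : List Bool) : ∀ (s : Int) (fl' : List Bool),
    (∀ x ∈ fl, x = false) →
    eIdx s (fl ++ fl') = eIdx (s + fl.length) fl' := by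
  induction fl with
  | nil => intro s fl' _; simp
  | cons f fs ih =>
      intro s fl' h
      have hf : f = false := h f (by simp)
      subst hf
      rw [List.cons_append, eIdx_false_cons, ih (s + 1) fl'
        (by intro x hx; exact h x (by simp [hx]))]
      congr 1
      simp only [List.length_cons]; push_cast; ring

-- equation lemma for the lookahead case
theorem eIdx_cons_cons (s : Int) (f f' : Bool) (fs : List Bool) :
    eIdx s (f :: f' :: fs) =
      if f && !f' then s :: eIdx (s + 1) (f' :: fs) else eIdx (s + 1) (f' :: fs) := rfl

-- with a false (or no) head, the previous flag is irrelevant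
theorem sIdx_head_false (p : Bool) (s : Int) (l : List Bool)
    (h : l.head?.getD false = false) : sIdx p s l = sIdx false s l := by
  cases l with
  | nil => rfl
  | cons f fs =>
      have hf : f = false := by simpa using h
      subst hf
      rw [sIdx_false_cons]
      cases p <;> simp [sIdx]

-- inside an all-true run, no further start is recorded
theorem sIdx_true_skip (fl : List Bool) : ∀ (s : Int) (fl' : List Bool),
    (∀ x ∈ fl, x = true) →
    sIdx true s (fl ++ fl') = sIdx true (s + fl.length) fl' := by
  induction fl with
  | nil => intro s fl' _; simp
  | cons f fs ih =>
      intro s fl' h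
      have hf : f = true := h f (by simp)
      subst hf
      rw [List.cons_append, show sIdx true s (true :: (fs ++ fl')) =
        sIdx true (s + 1) (fs ++ fl') by simp [sIdx]]
      rw [ih (s + 1) fl' (by intro x hx; exact h x (by simp [hx]))]
      congr 1; simp only [List.length_cons]; push_cast; ring

-- an all-true run followed by a non-comment head (or nothing) yields exactly one start …
theorem sIdx_true_run (fl : List Bool) (s : Int) (fl' : List Bool)
    (h : ∀ x ∈ fl, x = true) (hne : fl ≠ []) (hh : fl'.head?.getD false = false) :
    sIdx false s (fl ++ fl') = s :: sIdx false (s + fl.length) fl' := by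
  cases fl with
  | nil => exact absurd rfl hne
  | cons f fs =>
      have hf : f = true := h f (by simp)
      subst hf
      rw [List.cons_append, show sIdx false s (true :: (fs ++ fl')) =
        s :: sIdx true (s + 1) (fs ++ fl') by simp [sIdx]]
      rw [sIdx_true_skip fs (s + 1) fl' (by intro x hx; exact h x (by simp [hx]))]
      rw [sIdx_head_false true _ _ hh]
      congr 2; simp only [List.length_cons]; push_cast; ring

-- … and exactly one end
theorem eIdx_true_run (fl : List Bool) : ∀ (s : Int) (fl' : List Bool),
    (∀ x ∈ fl, x = true) → fl ≠ [] → fl'.head?.getD false = false →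
    eIdx s (fl ++ fl') = (s + fl.length - 1) :: eIdx (s + fl.length) fl' := by
  induction fl with
  | nil => intro _ _ _ hne _; exact absurd rfl hne
  | cons f fs ih =>
      intro s fl' h _ hh
      have hf : f = true := h f (by simp)
      subst hf
      cases hfs : fs with
      | nil =>
          cases hfl' : fl' with
          | nil => simp [eIdx]
          | cons u us =>
              have hu : u = false := by simpa [hfl'] using hh
              subst hu
              rw [List.cons_append, List.nil_append, eIdx_cons_cons]
              norm_num
      | cons g gs =>
          have hg : g = true := h g (by simp [hfs])
          subst hg
          subst hfs
          rw [show ((true :: true :: gs) ++ fl') = true :: true :: (gs ++ fl') by simp,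
            eIdx_cons_cons]
          simp only [Bool.not_true, Bool.and_false, if_neg Bool.false_ne_true]
          rw [show (true :: (gs ++ fl')) = ((true :: gs) ++ fl') by simp]
          rw [ih (s + 1) fl' (by intro x hx; exact h x (by simp [hx])) (by simp) hh]
          congr 1
          · simp only [List.length_cons]; push_cast; ring
          · congr 1
            simp only [List.length_cons]; push_cast; ring

-- B applied to an arbitrary suffix of the line list, indices offset by the consumed prefix
def bSuffix (cleanedAll : List String) (k : Nat) (lines : List String) : List String :=
  (((sIdx false (k : Int) (lines.map pvKey)).zip (eIdx (k : Int) (lines.map pvKey))).map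
    (fun se => PySem.Str.join " " (PySem.List.slice cleanedAll (some se.1) (some (se.2 + 1)))))

-- main B invariant: boundary pairs over the remaining lines reproduce runJoin
theorem bMain (n : Nat) : ∀ lines : List String, lines.length ≤ n →
    ∀ (k : Nat) (pre : List String), pre.length = k →
    bSuffix (pre ++ lines.map pvClean) k lines = runJoin lines := by
  induction n with
  | zero =>
      intro lines hlen k pre hk
      have : lines = [] := List.eq_nil_of_length_eq_zero (Nat.le_zero.mp hlen)
      subst this; simp [bSuffix, sIdx, eIdx, runJoin, pvGroupRuns]
  | succ n ih =>
      intro lines hlen k pre hk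
      match lines with
      | [] => simp [bSuffix, sIdx, eIdx, runJoin, pvGroupRuns]
      | l :: ls =>
        set run := l :: ls.takeWhile (fun x => pvKey x == pvKey l) with hrun
        set rest := ls.dropWhile (fun x => pvKey x == pvKey l) with hrest
        have hsplit : l :: ls = run ++ rest := by
          rw [hrun, hrest]; simp [List.takeWhile_append_dropWhile]
        have hrestlen : rest.length ≤ n := by
          have h1 := List.length_dropWhile_le (fun x => pvKey x == pvKey l) ls
          simp at hlen; rw [hrest]; omega
        have hrunkey : ∀ x ∈ run, pvKey x = pvKey l := by
          intro x hx
          rcases List.mem_cons.mp hx with h | h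
          · subst h; rfl
          · simpa using List.mem_takeWhile_imp h
        have hresthead : (rest.map pvKey).head?.getD false = false ∨
            ((rest.map pvKey).head?.getD false = true ∧ pvKey l = false) := by
          cases hdw : rest with
          | nil => left; simp
          | cons r rs =>
              have hrk : pvKey r ≠ pvKey l := by
                have := head_dropWhile_false (fun x => pvKey x == pvKey l) ls (hrest ▸ hdw)
                simpa using this
              cases hkl : pvKey l
              · right
                constructor
                · simp only [List.map_cons, List.head?_cons, Option.getD_some]
                  cases hkr : pvKey r
                  · exact absurd (hkr.trans hkl.symm) hrk
                  · rfl
                · rfl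
              · left
                simp only [List.map_cons, List.head?_cons, Option.getD_some]
                cases hkr : pvKey r
                · rfl
                · exact absurd (hkr.trans hkl.symm) hrk
        have hgr : runJoin (l :: ls) =
            (if pvKey l then [PySem.Str.join " " (run.map pvClean)] else []) ++ runJoin rest := by
          rw [runJoin, pvGroupRuns, List.filterMap_cons, runJoin]
          by_cases hkl : pvKey l = true <;> simp [hkl, hrun, hrest]
        have hflags : (l :: ls).map pvKey = run.map pvKey ++ rest.map pvKey := by
          rw [hsplit, List.map_append]
        have hclean : pre ++ (l :: ls).map pvClean =
            (pre ++ run.map pvClean) ++ rest.map pvClean := by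
          rw [hsplit, List.map_append, List.append_assoc]
        have hprelen : (pre ++ run.map pvClean).length = k + run.length := by
          simp [hk]
        by_cases hkl : pvKey l = true
        · -- comment run: one (start, end) pair, slicing out exactly this run's cleaned lines
          have hall : ∀ x ∈ run.map pvKey, x = true := by
            intro x hx
            rcases List.mem_map.mp hx with ⟨y, hy, hxy⟩
            rw [← hxy, hrunkey y hy, hkl]
          have hhd : (rest.map pvKey).head?.getD false = false := by
            rcases hresthead with h | ⟨_, h2⟩
            · exact h
            · rw [hkl] at h2; cases h2
          unfold bSuffix
          rw [hflags,
            sIdx_true_run (run.map pvKey) (k : Int) (rest.map pvKey) hall (by simp [hrun]) hhd,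
            eIdx_true_run (run.map pvKey) (k : Int) (rest.map pvKey) hall (by simp [hrun]) hhd]
          rw [List.zip_cons_cons, List.map_cons]
          have hlen_eq : ((run.map pvKey).length : Int) = (run.length : Int) := by simp
          have hidx : ((k : Int) + (run.map pvKey).length - 1) + 1 = ((k + run.length : Nat) : Int) := by
            rw [hlen_eq]; push_cast; ring
          have hs2 : (k : Int) + (run.map pvKey).length = ((k + run.length : Nat) : Int) := by
            rw [hlen_eq]; push_cast; ring
          have hslice : PySem.List.slice (pre ++ (l :: ls).map pvClean) (some (k : Int))
              (some (((k : Int) + (run.map pvKey).length - 1) + 1)) = run.map pvClean := by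
            rw [hidx, hclean, PySem.List.slice_natCast]
            rw [show ((pre ++ run.map pvClean) ++ rest.map pvClean).drop k =
                  run.map pvClean ++ rest.map pvClean by
              rw [← hk, List.append_assoc, List.drop_left]]
            rw [show k + run.length - k = run.length by omega]
            rw [show run.length = (run.map pvClean).length by simp, List.take_left]
          rw [hslice, hgr, if_pos hkl]
          rw [hs2]
          have := ih rest hrestlen (k + run.length) (pre ++ run.map pvClean) hprelen
          unfold bSuffix at this
          rw [← hclean] at this
          rw [this]
          simp
        · -- non-comment run: no boundary pair from this run
          have hall : ∀ x ∈ run.map pvKey, x = false := by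
            intro x hx
            rcases List.mem_map.mp hx with ⟨y, hy, hxy⟩
            rw [← hxy, hrunkey y hy]
            simpa using hkl
          unfold bSuffix
          rw [hflags,
            sIdx_all_false (run.map pvKey) false (k : Int) (rest.map pvKey) hall (by simp [hrun]),
            eIdx_all_false (run.map pvKey) (k : Int) (rest.map pvKey) hall]
          have hs2 : (k : Int) + (run.map pvKey).length = ((k + run.length : Nat) : Int) := by
            push_cast; simp
          rw [hs2, hgr, if_neg hkl]
          have := ih rest hrestlen (k + run.length) (pre ++ run.map pvClean) hprelen
          unfold bSuffix at this
          rw [← hclean] at this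
          rw [this]
          simp

-- ===== VERDICT (by name: the statement is the Claim_ definition above) =====
theorem get_reasoning_steps_spec : Claim_equal_get_reasoning_steps := by
  intro code _
  unfold Spec_get_reasoning_steps get_reasoning_steps get_reasoning_steps_alt
  set lines := (PySem.Str.split? code "\n").getD [] with hlines
  have hA : aFull lines [] [] = runJoin lines := by
    have := aMain lines.length lines le_rfl []
    simpa using this
  have hB : bSuffix (lines.map pvClean) 0 lines = runJoin lines := by
    have := bMain lines.length lines le_rfl 0 [] rfl
    simpa using this
  calc _ = aFull lines [] [] := rfl
    _ = runJoin lines := hA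
    _ = bSuffix (lines.map pvClean) 0 lines := hB.symm
    _ = _ := by
        unfold bSuffix
        rw [← starts_eq, ← ends_eq]
        rw [show ((lines.map pvKey).drop 1) = PySem.List.slice (lines.map pvKey) (some 1) none by
          rw [PySem.List.slice_from_one, List.drop_one]]
        rfl
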